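-- pv_equiv track=rewrite | github.com/981377660LMT/algorithm-study | 0_数组/二维数组/矩阵旋转/C - Shapes-旋转平移同构判断.py | canTranslate
-- ===== SOURCE A (Python) =====
-- from typing import List, TypeVar
--
-- T = TypeVar("T")
--
-- def canTranslate(matrix1: List[List[T]], matrix2: List[List[T]]) -> bool:
--     """判断matrix1和matrix2是否可以通过平移得到同一个矩阵"""
--     ROW, COL = len(matrix1), len(matrix1[0])
--     pos1 = [(i, j) for i in range(ROW) for j in range(COL) if matrix1[i][j] == "#"]
--     pos2 = [(i, j) for i in range(ROW) for j in range(COL) if matrix2[i][j] == "#"]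
--     if len(pos1) != len(pos2):
--         return False
--     offset = set([(x1 - x2, y1 - y2) for (x1, y1), (x2, y2) in zip(pos1, pos2)])
--     return len(offset) <= 1
-- ===== SOURCE B (Python) =====
-- def canTranslate(matrix1, matrix2):
--     """判断matrix1和matrix2是否可以通过平移得到同一个矩阵"""
--     ROW, COL = len(matrix1), len(matrix1[0])
--
--     def positions(m):
--         return [(i, j) for i in range(ROW) for j in range(COL) if m[i][j] == "#"]
--
--     def normalize(ps):
--         if not ps:
--             return []
--         a, b = ps[0]
--         return [(x - a, y - b) for x, y in ps]
--
--     return normalize(positions(matrix1)) == normalize(positions(matrix2))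
-- ===== Notes on version B (the rewrite author's own statement) =====
-- stated objective: alternative
-- what changed: Instead of zipping the two position lists and testing that the set of pairwise offsets has at most one element, B canonicalizes each grid's '#'-position list by subtracting its scan-order-first position and compares the two normalized lists directly.
import Mathlib
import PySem

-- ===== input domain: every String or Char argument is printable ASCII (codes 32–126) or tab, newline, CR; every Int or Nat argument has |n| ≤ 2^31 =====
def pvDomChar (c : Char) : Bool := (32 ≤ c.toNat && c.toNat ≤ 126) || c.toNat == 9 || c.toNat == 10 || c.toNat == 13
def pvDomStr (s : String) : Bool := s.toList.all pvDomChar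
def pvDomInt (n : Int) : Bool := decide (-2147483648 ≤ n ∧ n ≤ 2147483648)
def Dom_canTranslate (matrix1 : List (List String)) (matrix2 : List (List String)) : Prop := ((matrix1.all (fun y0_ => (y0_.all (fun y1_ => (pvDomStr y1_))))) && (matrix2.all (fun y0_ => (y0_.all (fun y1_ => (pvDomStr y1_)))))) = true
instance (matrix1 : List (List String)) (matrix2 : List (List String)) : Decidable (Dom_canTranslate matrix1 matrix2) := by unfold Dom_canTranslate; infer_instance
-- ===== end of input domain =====

-- B replaces A's zip-offset-set test by canonicalizing each '#'-position list relative to its first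
-- element and comparing the normalized lists (alternative decomposition, same cost).


-- ===== PORT A =====
-- shared helper: the comprehension [(i, j) for i in range(ROW) for j in range(COL) if m[i][j] == "#"];
-- indexing totalized with getD — exact under Pre_canTranslate (all indices in range)
def pvPos (m : List (List String)) (ROW COL : Nat) : List (Int × Int) :=
  (List.range ROW).flatMap (fun i =>
    (List.range COL).filterMap (fun j =>
      if ((m.getD i []).getD j "") = "#" then some ((i : Int), (j : Int)) else none))

def canTranslate (matrix1 : List (List String)) (matrix2 : List (List String)) : Bool :=
  let ROW := matrix1.length
  let COL := matrix1.headI.length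
  let pos1 := pvPos matrix1 ROW COL
  let pos2 := pvPos matrix2 ROW COL
  if pos1.length ≠ pos2.length then false
  else
    let offset := PySem.Set.ofList ((pos1.zip pos2).map
      (fun pq => (pq.1.1 - pq.2.1, pq.1.2 - pq.2.2)))
    decide (offset.length ≤ 1)

-- ===== PORT B =====
-- Source B's nested helper positions(m) is the very comprehension pvPos also ports for A; reused
-- Source B's normalize: subtract the first position from every position
def pvNorm (ps : List (Int × Int)) : List (Int × Int) :=
  match ps with
  | [] => []
  | (a, b) :: _ => ps.map (fun xy => (xy.1 - a, xy.2 - b))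

def canTranslate_alt (matrix1 : List (List String)) (matrix2 : List (List String)) : Bool :=
  let ROW := matrix1.length
  let COL := matrix1.headI.length
  decide (pvNorm (pvPos matrix1 ROW COL) = pvNorm (pvPos matrix2 ROW COL))

-- ===== PRECONDITION & SPEC =====
-- Pre_ excludes exactly the inputs on which A raises IndexError: matrix1 empty (len(matrix1[0])),
-- or (when COL > 0) a row of matrix1 shorter than COL, matrix2 with fewer than ROW rows, or one of
-- matrix2's first ROW rows shorter than COL (A indexes matrix2 with matrix1's bounds).
def Pre_canTranslate (matrix1 : List (List String)) (matrix2 : List (List String)) : Prop :=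
  matrix1 ≠ [] ∧
    (matrix1.headI.length = 0 ∨
      ((∀ row ∈ matrix1, matrix1.headI.length ≤ row.length) ∧
        matrix1.length ≤ matrix2.length ∧
        ∀ row ∈ matrix2.take matrix1.length, matrix1.headI.length ≤ row.length))
instance (matrix1 : List (List String)) (matrix2 : List (List String)) : Decidable (Pre_canTranslate matrix1 matrix2) := by unfold Pre_canTranslate; infer_instance

def pvWitness_canTranslate : List (List String) × List (List String) :=
  ([["#", "."], [".", "."]], [[".", "."], [".", "#"]])

def Spec_canTranslate (matrix1 : List (List String)) (matrix2 : List (List String)) (out : Bool) : Prop := out = canTranslate_alt matrix1 matrix2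
instance (matrix1 : List (List String)) (matrix2 : List (List String)) (out : Bool) : Decidable (Spec_canTranslate matrix1 matrix2 out) := by unfold Spec_canTranslate; infer_instance

-- ===== CLAIM (what is proved, stated in full; the proofs are below) =====
def Claim_equal_canTranslate : Prop := ∀ (matrix1 : List (List String)) (matrix2 : List (List String)), Dom_canTranslate matrix1 matrix2 → Pre_canTranslate matrix1 matrix2 → Spec_canTranslate matrix1 matrix2 (canTranslate matrix1 matrix2)

-- ===== LEMMAS AND PROOFS =====

-- a Python set built from x :: l has at most one element iff every element of l equals x
lemma setOfList_len_le_one {α : Type} [BEq α] [LawfulBEq α] (x : α) (l : List α) :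
    (PySem.Set.ofList (x :: l)).length ≤ 1 ↔ ∀ y ∈ l, y = x := by
  constructor
  · intro h y hy
    by_contra hne
    have hx : x ∈ PySem.Set.ofList (x :: l) := by
      rw [PySem.Set.mem_ofList]; exact List.mem_cons_self ..
    have hym : y ∈ PySem.Set.ofList (x :: l) := by
      rw [PySem.Set.mem_ofList]; exact List.mem_cons_of_mem _ hy
    match hs : PySem.Set.ofList (x :: l) with
    | [] => rw [hs] at hx; exact absurd hx (List.not_mem_nil)
    | [z] =>
      rw [hs] at hx hym
      simp only [List.mem_singleton] at hx hym
      exact hne (hym.trans hx.symm)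
    | z₁ :: z₂ :: t => rw [hs] at h; simp at h
  · intro h
    have hone : PySem.Set.ofList (x :: l) = [x] := by
      induction l with
      | nil => rfl
      | cons y t ih =>
        have hyx : y = x := h y (List.mem_cons_self ..)
        subst hyx
        have hstep : PySem.Set.ofList (y :: y :: t) = PySem.Set.ofList (y :: t) := by
          simp [PySem.Set.ofList_eq_foldl, List.foldl, PySem.Set.add]
        rw [hstep]
        exact ih (fun z hz => h z (List.mem_cons_of_mem _ hz))
    rw [hone]
    simp

-- normalized maps agree iff lengths agree and every zipped pair has the anchor offset
lemma map_sub_eq_iff (a c : Int × Int) :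
    ∀ (p q : List (Int × Int)),
      (p.map (fun xy => (xy.1 - a.1, xy.2 - a.2)) = q.map (fun xy => (xy.1 - c.1, xy.2 - c.2)))
      ↔ (p.length = q.length ∧
          ∀ pq ∈ p.zip q, (pq.1.1 - pq.2.1, pq.1.2 - pq.2.2) = (a.1 - c.1, a.2 - c.2)) := by
  intro p
  induction p with
  | nil =>
    intro q
    cases q <;> simp
  | cons u p ih =>
    intro q
    cases q with
    | nil => simp
    | cons v q =>
      constructor
      · intro h
        simp only [List.map_cons, List.cons.injEq, Prod.mk.injEq] at h
        obtain ⟨⟨h1, h2⟩, ht⟩ := h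
        have hrest := (ih q).mp ht
        refine ⟨by simp [hrest.1], ?_⟩
        intro pq hmem
        rcases List.mem_cons.mp hmem with rfl | hmem'
        · refine Prod.ext ?_ ?_ <;> simp <;> omega
        · exact hrest.2 pq hmem'
      · rintro ⟨hlen, hall⟩
        have hu := hall (u, v) (List.mem_cons_self ..)
        simp only [Prod.mk.injEq] at hu
        simp only [List.map_cons, List.cons.injEq, Prod.mk.injEq]
        refine ⟨⟨by omega, by omega⟩, ?_⟩
        apply (ih q).mpr
        refine ⟨by simpa using hlen, ?_⟩
        intro pq hmem
        exact hall pq (List.mem_cons_of_mem _ hmem)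

-- core: A's zip-offset-set test equals B's normalize-and-compare test, for any position lists
lemma core (p q : List (Int × Int)) :
    (if p.length ≠ q.length then false
     else decide ((PySem.Set.ofList ((p.zip q).map
        (fun pq => (pq.1.1 - pq.2.1, pq.1.2 - pq.2.2)))).length ≤ 1))
    = decide (pvNorm p = pvNorm q) := by
  cases p with
  | nil =>
    cases q with
    | nil => rfl
    | cons v q => simp [pvNorm]
  | cons u p =>
    cases q with
    | nil => simp [pvNorm]
    | cons v q =>
      by_cases hlen : p.length = q.length
      · simp only [List.length_cons, hlen, ne_eq, not_true_eq_false, if_neg, not_not,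
          if_pos rfl, List.zip_cons_cons, List.map_cons, reduceIte]
        have hA := setOfList_len_le_one (u.1 - v.1, u.2 - v.2)
          ((p.zip q).map (fun pq => (pq.1.1 - pq.2.1, pq.1.2 - pq.2.2)))
        have hB : (pvNorm (u :: p) = pvNorm (v :: q)) ↔
            (p.map (fun xy => (xy.1 - u.1, xy.2 - u.2)) = q.map (fun xy => (xy.1 - v.1, xy.2 - v.2))) := by
          obtain ⟨u1, u2⟩ := u
          obtain ⟨v1, v2⟩ := v
          simp [pvNorm]
        have hM := map_sub_eq_iff u v p q
        simp only [decide_eq_decide]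
        rw [hA, hB, hM]
        constructor
        · intro h
          refine ⟨hlen, ?_⟩
          intro pq hmem
          have : (pq.1.1 - pq.2.1, pq.1.2 - pq.2.2) ∈
              (p.zip q).map (fun pq => (pq.1.1 - pq.2.1, pq.1.2 - pq.2.2)) :=
            List.mem_map_of_mem hmem
          exact h _ this
        · rintro ⟨-, hall⟩
          intro y hy
          obtain ⟨pq, hmem, rfl⟩ := List.mem_map.mp hy
          exact hall pq hmem
      · have h1 : (u :: p).length ≠ (v :: q).length := by simp [hlen]
        rw [if_pos h1]
        have : pvNorm (u :: p) ≠ pvNorm (v :: q) := by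
          intro h
          have := congrArg List.length h
          obtain ⟨u1, u2⟩ := u
          obtain ⟨v1, v2⟩ := v
          simp [pvNorm] at this
          exact hlen this
        simp [this]

-- ===== VERDICT (by name: the statement is the Claim_ definition above) =====
theorem canTranslate_spec : Claim_equal_canTranslate := by
  intro m1 m2 _ _
  unfold Spec_canTranslate canTranslate canTranslate_alt
  exact core (pvPos m1 m1.length m1.headI.length) (pvPos m2 m1.length m1.headI.length)
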